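-- pv_equiv track=rewrite | github.com/KumarAbhinav2/CodingProblems | Arrays/how-many-apples-can-you-put-into-the-basket(LTE-1196).py | maxNumberOfApples_better
-- ===== SOURCE A (Python) =====
-- import heapq
--
-- def maxNumberOfApples_better(nums):
--     heapq.heapify(nums)
--     apples = 0
--     units = 0
--     while nums and units+nums[0] < 5000:
--         units += heapq.heappop(nums)
--         apples+=1
--     return apples
-- ===== SOURCE B (Python) =====
-- def maxNumberOfApples_better(nums):
--     apples = 0
--     units = 0
--     for w in sorted(nums):
--         if units + w >= 5000:
--             break
--         units += w
--         apples += 1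
--     return apples
-- ===== Notes on version B (the rewrite author's own statement) =====
-- stated objective: simpler
-- what changed: Replaces the heapify + repeated heappop loop with a one-shot sort followed by a single linear prefix scan that breaks at the first weight reaching the 5000 limit; B also leaves nums unmutated (A heapifies/pops it in place), so equivalence is about the return value.
import Mathlib
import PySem

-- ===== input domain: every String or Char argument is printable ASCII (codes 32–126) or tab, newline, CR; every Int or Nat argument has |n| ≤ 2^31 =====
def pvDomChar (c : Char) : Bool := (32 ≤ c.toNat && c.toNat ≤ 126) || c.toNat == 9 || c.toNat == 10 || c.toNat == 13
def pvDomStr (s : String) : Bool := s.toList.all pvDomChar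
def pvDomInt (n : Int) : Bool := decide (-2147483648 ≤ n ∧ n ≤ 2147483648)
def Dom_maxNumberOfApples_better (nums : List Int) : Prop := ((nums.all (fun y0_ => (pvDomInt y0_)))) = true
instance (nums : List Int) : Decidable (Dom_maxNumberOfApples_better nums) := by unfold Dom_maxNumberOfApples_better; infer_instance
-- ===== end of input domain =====

-- B replaces A's heapify+heappop loop by sort-once + one linear prefix scan (simpler);
-- A mutates nums in place (heapify/pops) while B does not — the equivalence proved is about the return value only.

-- ===== PORT A =====
-- A's heap is modeled by min-extraction: after heapify, nums[0] is the minimum of the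
-- remaining elements and heappop removes one occurrence of it (exact for the return value,
-- which depends only on the multiset of weights).
def pvALoop (l : List Int) (apples units : Int) : Int :=
  match h : PySem.List.min? l (fun y => y) with
  | none => apples
  | some m =>
      if units + m < 5000 then pvALoop (l.erase m) (apples + 1) (units + m) else apples
termination_by l.length
decreasing_by
  have hm := PySem.List.min?_mem h
  have h1 := List.length_erase_of_mem hm
  have h2 := List.length_pos_of_mem hm
  omega

def maxNumberOfApples_better (nums : List Int) : Int :=
  pvALoop nums 0 0

-- ===== PORT B =====
def pvBLoop (l : List Int) (apples units : Int) : Int :=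
  match l with
  | [] => apples
  | w :: rest =>
      if units + w >= 5000 then apples
      else pvBLoop rest (apples + 1) (units + w)

def maxNumberOfApples_better_alt (nums : List Int) : Int :=
  pvBLoop (PySem.List.sorted nums (fun y => y) false) 0 0

-- ===== PRECONDITION & SPEC =====
def Spec_maxNumberOfApples_better (nums : List Int) (out : Int) : Prop := out = maxNumberOfApples_better_alt nums
instance (nums : List Int) (out : Int) : Decidable (Spec_maxNumberOfApples_better nums out) := by unfold Spec_maxNumberOfApples_better; infer_instance

-- ===== CLAIM =====
def Claim_equal_maxNumberOfApples_better : Prop := ∀ (nums : List Int), Dom_maxNumberOfApples_better nums → Spec_maxNumberOfApples_better nums (maxNumberOfApples_better nums)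

-- ===== LEMMAS AND PROOFS =====
-- Sorted list of a nonempty list starts with its minimum, followed by the sorted erase.
theorem sorted_cons_min {l : List Int} {m : Int}
    (h : PySem.List.min? l (fun y => y) = some m) :
    PySem.List.sorted l (fun y => y) false =
      m :: PySem.List.sorted (l.erase m) (fun y => y) false := by
  have hm : m ∈ l := PySem.List.min?_mem h
  apply PySem.List.sorted_id_eq_of_perm_of_pairwise
  · exact ((PySem.List.sorted_perm (l.erase m) (fun y => y) false).cons m).trans
      (l.perm_cons_erase hm).symm
  · refine List.Pairwise.cons ?_ ?_
    · intro y hy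
      have : y ∈ l.erase m := (PySem.List.mem_sorted _ _ _ _).mp hy
      exact PySem.List.min?_isMin h y (List.mem_of_mem_erase this)
    · exact PySem.List.sorted_pairwise (l.erase m) (fun y => y)

theorem aLoop_eq_bLoop_sorted :
    ∀ (n : ℕ) (l : List Int), l.length = n → ∀ (a u : Int),
      pvALoop l a u = pvBLoop (PySem.List.sorted l (fun y => y) false) a u := by
  intro n
  induction n using Nat.strong_induction_on with
  | _ n ih =>
    intro l hlen a u
    match hmin : PySem.List.min? l (fun y => y) with
    | none =>
      have hl : l = [] := (PySem.List.min?_eq_none_iff _ _).mp hmin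
      subst hl
      simp [pvALoop, PySem.List.min?, PySem.List.sorted, pvBLoop]
    | some m =>
      have hm : m ∈ l := PySem.List.min?_mem hmin
      have hlt : (l.erase m).length < l.length := by
        have h1 := List.length_erase_of_mem hm
        have h2 := List.length_pos_of_mem hm
        omega
      rw [pvALoop, hmin, sorted_cons_min hmin, pvBLoop]
      by_cases hc : u + m < 5000
      · simp only [hc, if_pos, if_neg (by omega : ¬ u + m ≥ 5000)]
        exact ih (l.erase m).length (hlen ▸ hlt) (l.erase m) rfl (a + 1) (u + m)
      · simp only [if_neg hc, if_pos (by omega : u + m ≥ 5000)]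

-- ===== VERDICT =====
theorem maxNumberOfApples_better_spec : Claim_equal_maxNumberOfApples_better := by
  intro nums _
  unfold Spec_maxNumberOfApples_better maxNumberOfApples_better maxNumberOfApples_better_alt
  exact aLoop_eq_bLoop_sorted nums.length nums rfl 0 0
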